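-- pv_equiv track=rewrite | github.com/Samarth1410/Compounding-Words | file.py | fetch_longest_and_second_longest
-- ===== SOURCE A (Python) =====
-- def fetch_longest_and_second_longest(words):
--     if not words:
--         return None, None
--
--     longest = ""
--     second_longest = ""
--
--     for word in words:
--         if len(word) > len(longest):
--             second_longest = longest
--             longest = word
--         elif len(word) > len(second_longest):
--             second_longest = word
--
--     return longest, second_longest
-- ===== SOURCE B (Python) =====
-- def fetch_longest_and_second_longest(words):
--     if not words:
--         return None, None
--
--     ordered = sorted(words, key=len, reverse=True)
--     longest = ordered[0] if ordered else ""
--     second_longest = ordered[1] if len(ordered) > 1 else ""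
--     return longest, second_longest
-- ===== Notes on version B (the rewrite author's own statement) =====
-- stated objective: idiomatic
-- what changed: Replaces the single greedy two-register scan with a stable descending sort by length followed by indexing the first two elements (defaulting to '')
import Mathlib
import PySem

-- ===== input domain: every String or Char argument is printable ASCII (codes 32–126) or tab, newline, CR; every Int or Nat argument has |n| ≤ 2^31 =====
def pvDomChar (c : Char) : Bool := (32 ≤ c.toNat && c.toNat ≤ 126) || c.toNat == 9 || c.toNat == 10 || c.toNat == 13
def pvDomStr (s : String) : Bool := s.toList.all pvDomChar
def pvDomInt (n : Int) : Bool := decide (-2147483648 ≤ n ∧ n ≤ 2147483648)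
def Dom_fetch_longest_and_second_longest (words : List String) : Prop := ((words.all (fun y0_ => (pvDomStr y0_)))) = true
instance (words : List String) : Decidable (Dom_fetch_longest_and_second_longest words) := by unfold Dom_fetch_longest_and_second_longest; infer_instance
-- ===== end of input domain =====

-- B replaces A's greedy two-register scan with a stable descending sort by length then taking the first two elements (idiomatic; not faster).


-- ===== PORT A =====
-- loop body of A's for-loop
def pvStep (st : String × String) (w : String) : String × String :=
  if PySem.Str.len w > PySem.Str.len st.1 then (w, st.1)
  else if PySem.Str.len w > PySem.Str.len st.2 then (st.1, w)
  else st

def fetch_longest_and_second_longest (words : List String) : Option String × Option String :=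
  if words = [] then (none, none)
  else
    let p := words.foldl pvStep ("", "")
    (some p.1, some p.2)

-- ===== PORT B =====
def fetch_longest_and_second_longest_alt (words : List String) : Option String × Option String :=
  if words = [] then (none, none)
  else
    let ordered := PySem.List.sorted words (fun w => PySem.Str.len w) true
    let longest := ordered.headD ""        -- ordered[0] if ordered else ""
    let second_longest := (ordered.drop 1).headD ""   -- ordered[1] if len(ordered) > 1 else ""
    (some longest, some second_longest)

-- ===== PRECONDITION & SPEC =====
def Spec_fetch_longest_and_second_longest (words : List String) (out : Option String × Option String) : Prop := out = fetch_longest_and_second_longest_alt words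
instance (words : List String) (out : Option String × Option String) : Decidable (Spec_fetch_longest_and_second_longest words out) := by unfold Spec_fetch_longest_and_second_longest; infer_instance

-- ===== CLAIM (what is proved, stated in full; the proofs are below) =====
def Claim_equal_fetch_longest_and_second_longest : Prop := ∀ (words : List String), Dom_fetch_longest_and_second_longest words → Spec_fetch_longest_and_second_longest words (fetch_longest_and_second_longest words)

-- ===== LEMMAS AND PROOFS =====

-- the first two elements of a list, with "" as default
def pvTop2 (l : List String) : String × String := (l.headD "", (l.drop 1).headD "")

-- one greedy update step equals one stable descending insertion, on the first-two view
theorem pvStep_insert (l : List String) (w : String) :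
    pvStep (pvTop2 l) w
      = pvTop2 (PySem.List.insertBy
          (fun a b => decide (PySem.Str.len b < PySem.Str.len a)) w l) := by
  cases l with
  | nil =>
    by_cases h : w = ""
    · subst h; simp [pvStep, pvTop2, PySem.List.insertBy]
    · have h' : 0 < w.length :=
        Nat.pos_of_ne_zero (fun hh => h (String.length_eq_zero_iff.mp hh))
      simp [pvStep, pvTop2, PySem.List.insertBy, h']
  | cons a rest =>
    cases rest with
    | nil =>
      by_cases h : w = ""
      · subst h
        have hna : ¬ ((a.length : Int) < 0) := by omega
        simp [pvStep, pvTop2, PySem.List.insertBy, hna]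
      · have h' : 0 < w.length :=
          Nat.pos_of_ne_zero (fun hh => h (String.length_eq_zero_iff.mp hh))
        by_cases ha : a.length < w.length
        · simp [pvStep, pvTop2, PySem.List.insertBy, ha]
        · simp [pvStep, pvTop2, PySem.List.insertBy, ha, h']
    | cons b t =>
      by_cases ha : a.length < w.length
      · simp [pvStep, pvTop2, PySem.List.insertBy, ha]
      · by_cases hb : b.length < w.length
        · simp [pvStep, pvTop2, PySem.List.insertBy, ha, hb]
        · simp [pvStep, pvTop2, PySem.List.insertBy, ha, hb]

-- the whole greedy fold equals the first-two view of the insertion fold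
theorem pvFold_top2 (ws : List String) (l : List String) :
    ws.foldl pvStep (pvTop2 l)
      = pvTop2 (ws.foldl
          (fun acc x => PySem.List.insertBy
            (fun a b => decide (PySem.Str.len b < PySem.Str.len a)) x acc) l) := by
  induction ws generalizing l with
  | nil => rfl
  | cons w ws ih =>
    simp only [List.foldl_cons, pvStep_insert l w]
    exact ih _

-- ===== VERDICT (by name: the statement is the Claim_ definition above) =====
theorem fetch_longest_and_second_longest_spec : Claim_equal_fetch_longest_and_second_longest := by
  intro words _
  unfold Spec_fetch_longest_and_second_longest
  unfold fetch_longest_and_second_longest fetch_longest_and_second_longest_alt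
  by_cases h : words = []
  · simp [h]
  · simp only [h, if_false]
    rw [PySem.List.sorted_rev_eq_foldl_insertBy]
    have : pvTop2 ([] : List String) = ("", "") := rfl
    rw [← this, pvFold_top2 words []]
    rfl
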